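-- pv_equiv track=rewrite | github.com/UNayoung/coding_test | programmers_coding_test/Level_1/20_12_26_12930.py | solution
-- ===== SOURCE A (Python) =====
-- def solution(s):
--     answer = ''
--     word = s.split(' ')
--     count=0
--     for i in word:
--         if(count!=0):
--             answer+=" "
--         for j in range(0, len(i)):
--             if(j%2==0):
--                 temp = ord(i[j])
--                 if(temp>=ord("a")):
--                     temp-=ord("a")-ord("A")
--                     answer+=chr(temp)
--                 else:
--                     answer+=i[j]
--             else:
--                 temp = ord(i[j])
--                 if(temp<ord("a")):
--                     temp+=ord("a")-ord("A")
--                     answer+=chr(temp)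
--                 else:
--                     answer+=i[j]
--         count+=1
--     return answer
-- ===== SOURCE B (Python) =====
-- def solution(s):
--     out = []
--     k = 0
--     for ch in s:
--         if ch == ' ':
--             out.append(' ')
--             k = 0
--         else:
--             t = ord(ch)
--             if k % 2 == 0:
--                 out.append(chr(t - 32) if t >= ord('a') else ch)
--             else:
--                 out.append(chr(t + 32) if t < ord('a') else ch)
--             k += 1
--     return ''.join(out)
-- ===== Notes on version B (the rewrite author's own statement) =====
-- stated objective: simpler
-- what changed: Replaces split(' ') + nested word/index loops + separator counting with one flat pass over the string using a per-word character counter that resets at each space.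
import Mathlib
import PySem

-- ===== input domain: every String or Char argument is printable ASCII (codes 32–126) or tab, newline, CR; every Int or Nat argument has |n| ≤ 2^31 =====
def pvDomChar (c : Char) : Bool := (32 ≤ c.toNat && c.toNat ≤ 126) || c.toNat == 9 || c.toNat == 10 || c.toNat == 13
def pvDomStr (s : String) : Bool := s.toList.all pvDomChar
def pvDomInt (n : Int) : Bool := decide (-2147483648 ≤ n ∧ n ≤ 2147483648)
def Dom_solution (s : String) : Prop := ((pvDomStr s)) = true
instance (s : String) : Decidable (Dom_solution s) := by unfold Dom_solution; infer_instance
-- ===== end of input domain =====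

-- B replaces A's split(' ') + nested word/index loops + separator counter with one flat
-- pass using a per-word character counter that resets at each space (objective: simpler).

-- ===== PORT A =====
def solution (s : String) : String :=
  let word := PySem.Chars.splitOn s.toList [' ']
  let res := word.foldl (fun (st : List Char × Nat) i =>
      let answer := if st.2 ≠ 0 then st.1 ++ [' '] else st.1
      let answer := (PySem.List.pyRange 0 (PySem.List.len i) 1).foldl (fun answer j =>
          let cj := PySem.List.pyGetD i j ' '
          if PySem.Int.mod j 2 == 0 then
            (if cj.toNat ≥ 97 then answer ++ [Char.ofNat (cj.toNat - (97 - 65))]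
             else answer ++ [cj])
          else
            (if cj.toNat < 97 then answer ++ [Char.ofNat (cj.toNat + (97 - 65))]
             else answer ++ [cj])) answer
      (answer, st.2 + 1)) ([], 0)
  String.ofList res.1

-- ===== PORT B =====
def solution_alt (s : String) : String :=
  let res := s.toList.foldl (fun (st : List Char × Nat) ch =>
      if ch = ' ' then (st.1 ++ [' '], 0)
      else
        let t := ch.toNat
        let d := if st.2 % 2 == 0 then (if t ≥ 97 then Char.ofNat (t - 32) else ch)
                 else (if t < 97 then Char.ofNat (t + 32) else ch)
        (st.1 ++ [d], st.2 + 1)) ([], 0)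
  String.ofList res.1

-- ===== PRECONDITION & SPEC =====
def Spec_solution (s : String) (out : String) : Prop := out = solution_alt s
instance (s : String) (out : String) : Decidable (Spec_solution s out) := by unfold Spec_solution; infer_instance

-- ===== CLAIM (what is proved, stated in full; the proofs are below) =====
def Claim_equal_solution : Prop := ∀ (s : String), Dom_solution s → Spec_solution s (solution s)

-- ===== LEMMAS AND PROOFS =====

-- the per-character transform both Pythons apply at in-word position k
def pvF (k : Nat) (c : Char) : Char :=
  if k % 2 == 0 then (if c.toNat ≥ 97 then Char.ofNat (c.toNat - 32) else c)
  else (if c.toNat < 97 then Char.ofNat (c.toNat + 32) else c)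

-- transform a word, positions starting at k
def pvWmapFrom (k : Nat) : List Char → List Char
  | [] => []
  | c :: cs => pvF k c :: pvWmapFrom (k + 1) cs

-- split on single spaces, with the pending partial word `cur`
def pvW (cur : List Char) : List Char → List (List Char)
  | [] => [cur]
  | c :: cs => if c = ' ' then cur :: pvW [] cs else pvW (cur ++ [c]) cs

-- the words after the first, each preceded by a space (A's count ≠ 0 branch)
def pvJtail : List (List Char) → List Char
  | [] => []
  | w :: ws => ' ' :: (pvWmapFrom 0 w ++ pvJtail ws)

def pvJ : List (List Char) → List Char
  | [] => []
  | w :: ws => pvWmapFrom 0 w ++ pvJtail ws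

-- B's resettable-counter pass
def pvG (k : Nat) : List Char → List Char
  | [] => []
  | c :: cs => if c = ' ' then ' ' :: pvG 0 cs else pvF k c :: pvG (k + 1) cs

theorem pvWmapFrom_append (k : Nat) (w : List Char) (c : Char) :
    pvWmapFrom k (w ++ [c]) = pvWmapFrom k w ++ [pvF (k + w.length) c] := by
  induction w generalizing k with
  | nil => simp [pvWmapFrom]
  | cons x xs ih => simp [pvWmapFrom, ih, Nat.add_assoc, Nat.add_comm 1 xs.length]

theorem pvW_ne_nil (cur cs : List Char) : pvW cur cs ≠ [] := by
  induction cs generalizing cur with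
  | nil => simp [pvW]
  | cons c cs ih => simp only [pvW]; split <;> simp [ih]

theorem pv_go_spec (fuel : Nat) (l cur : List Char) (acc : List (List Char))
    (h : l.length < fuel) :
    PySem.Chars.splitOn.go [' '] fuel l cur acc = acc.reverse ++ pvW cur.reverse l := by
  induction fuel generalizing l cur acc with
  | zero => omega
  | succ fuel ih =>
    cases l with
    | nil =>
      rw [show PySem.Chars.splitOn.go [' '] (fuel + 1) [] cur acc
            = (cur.reverse :: acc).reverse from rfl]
      simp [pvW]
    | cons c rest =>
      rw [show PySem.Chars.splitOn.go [' '] (fuel + 1) (c :: rest) cur acc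
            = (if [' '].isPrefixOf (c :: rest) then
                 PySem.Chars.splitOn.go [' '] fuel rest [] (cur.reverse :: acc)
               else PySem.Chars.splitOn.go [' '] fuel rest (c :: cur) acc) from rfl]
      by_cases hc : c = ' '
      · subst hc
        rw [if_pos (by simp [List.isPrefixOf])]
        rw [ih rest [] (cur.reverse :: acc) (by simp at h; omega)]
        simp [pvW]
      · rw [if_neg (by
          simp only [List.isPrefixOf, Bool.and_true, beq_iff_eq]
          exact fun h' => hc h'.symm)]
        rw [ih rest (c :: cur) acc (by simp at h; omega)]
        simp [pvW, hc]

theorem pv_splitOn_eq (cs : List Char) :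
    PySem.Chars.splitOn cs [' '] = pvW [] cs := by
  unfold PySem.Chars.splitOn
  rw [pv_go_spec cs.length.succ cs [] [] (Nat.lt_succ_self _)]
  simp

-- A's inner index loop over a word produces the transformed word
theorem pv_inner (w : List Char) (acc : List Char) :
    (PySem.List.pyRange 0 (PySem.List.len w) 1).foldl (fun answer j =>
        let cj := PySem.List.pyGetD w j ' '
        if PySem.Int.mod j 2 == 0 then
          (if cj.toNat ≥ 97 then answer ++ [Char.ofNat (cj.toNat - (97 - 65))]
           else answer ++ [cj])
        else
          (if cj.toNat < 97 then answer ++ [Char.ofNat (cj.toNat + (97 - 65))]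
           else answer ++ [cj])) acc = acc ++ pvWmapFrom 0 w := by
  induction w using List.reverseRecOn generalizing acc with
  | nil => simp [PySem.List.len, PySem.List.pyRange, pvWmapFrom]
  | append_singleton w c ih =>
    rw [PySem.List.len_eq] at *
    have hlen : ((w ++ [c]).length : Int) = (w.length : Int) + 1 := by
      simp
    rw [hlen, PySem.List.pyRange_one_succ_right (by positivity), List.foldl_append]
    have hfun : ∀ (a : List Char), ∀ j ∈ PySem.List.pyRange 0 (w.length : Int) 1,
        (fun answer j =>
          let cj := PySem.List.pyGetD (w ++ [c]) j ' '
          if PySem.Int.mod j 2 == 0 then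
            (if cj.toNat ≥ 97 then answer ++ [Char.ofNat (cj.toNat - (97 - 65))]
             else answer ++ [cj])
          else
            (if cj.toNat < 97 then answer ++ [Char.ofNat (cj.toNat + (97 - 65))]
             else answer ++ [cj])) a j =
        (fun answer j =>
          let cj := PySem.List.pyGetD w j ' '
          if PySem.Int.mod j 2 == 0 then
            (if cj.toNat ≥ 97 then answer ++ [Char.ofNat (cj.toNat - (97 - 65))]
             else answer ++ [cj])
          else
            (if cj.toNat < 97 then answer ++ [Char.ofNat (cj.toNat + (97 - 65))]
             else answer ++ [cj])) a j := by
      intro a j hj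
      have hj' := PySem.List.mem_pyRange_one.mp hj
      have hget : PySem.List.pyGetD (w ++ [c]) j ' ' = PySem.List.pyGetD w j ' ' := by
        rw [PySem.List.pyGetD_eq_getElem _ _ hj'.1 (by simp; omega),
            PySem.List.pyGetD_eq_getElem _ _ hj'.1 (by exact_mod_cast hj'.2)]
        rw [List.getElem_append_left (by omega)]
      simp only [hget]
    rw [PySem.List.foldl_congr_mem _ _ _ acc hfun, ih acc]
    have hget : PySem.List.pyGetD (w ++ [c]) ((w.length : Int)) ' ' = c := by
      rw [PySem.List.pyGetD_natCast]
      simp [List.getD]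
    have hmod : (PySem.Int.mod (w.length : Int) 2 == 0) = (w.length % 2 == 0) := by
      rw [show ((2 : Int)) = (((2 : Nat)) : Int) from rfl, PySem.Int.mod_natCast]
      rcases Nat.mod_two_eq_zero_or_one w.length with h | h <;> simp [h]
    simp only [List.foldl_cons, List.foldl_nil, hget, hmod]
    rw [pvWmapFrom_append]
    simp only [Nat.zero_add, pvF]
    split <;> split <;> simp

-- A's outer loop after the first word: each word is preceded by a space
theorem pv_outerA (ws : List (List Char)) (acc : List Char) (n : Nat) (hn : n ≠ 0) :
    (ws.foldl (fun (st : List Char × Nat) i =>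
      let answer := if st.2 ≠ 0 then st.1 ++ [' '] else st.1
      let answer := (PySem.List.pyRange 0 (PySem.List.len i) 1).foldl (fun answer j =>
          let cj := PySem.List.pyGetD i j ' '
          if PySem.Int.mod j 2 == 0 then
            (if cj.toNat ≥ 97 then answer ++ [Char.ofNat (cj.toNat - (97 - 65))]
             else answer ++ [cj])
          else
            (if cj.toNat < 97 then answer ++ [Char.ofNat (cj.toNat + (97 - 65))]
             else answer ++ [cj])) answer
      (answer, st.2 + 1)) (acc, n)).1 = acc ++ pvJtail ws := by
  induction ws generalizing acc n with
  | nil => simp [pvJtail]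
  | cons w ws ih =>
    simp only [List.foldl_cons]
    rw [show (if n ≠ 0 then acc ++ [' '] else acc) = acc ++ [' '] from if_pos hn]
    rw [pv_inner]
    rw [ih _ (n + 1) (Nat.succ_ne_zero n)]
    simp [pvJtail]

-- B's fold is the resettable-counter pass pvG
theorem pv_foldB (cs : List Char) (acc : List Char) (k : Nat) :
    (cs.foldl (fun (st : List Char × Nat) ch =>
      if ch = ' ' then (st.1 ++ [' '], 0)
      else
        let t := ch.toNat
        let d := if st.2 % 2 == 0 then (if t ≥ 97 then Char.ofNat (t - 32) else ch)
                 else (if t < 97 then Char.ofNat (t + 32) else ch)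
        (st.1 ++ [d], st.2 + 1)) (acc, k)).1 = acc ++ pvG k cs := by
  induction cs generalizing acc k with
  | nil => simp [pvG]
  | cons c cs ih =>
    simp only [List.foldl_cons]
    by_cases hc : c = ' '
    · simp only [hc, ih, pvG]; simp
    · simp only [if_neg hc]
      rw [ih]
      simp [pvG, hc, pvF]

theorem pv_Jtail_eq (ws : List (List Char)) (h : ws ≠ []) :
    pvJtail ws = ' ' :: pvJ ws := by
  cases ws with
  | nil => exact absurd rfl h
  | cons w ws => simp [pvJtail, pvJ]

-- bridge: A's per-word transform of the split equals B's resettable pass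
theorem pv_bridge (cs cur : List Char) :
    pvJ (pvW cur cs) = pvWmapFrom 0 cur ++ pvG cur.length cs := by
  induction cs generalizing cur with
  | nil => simp [pvW, pvJ, pvJtail, pvG]
  | cons c cs ih =>
    by_cases hc : c = ' '
    · subst hc
      rw [show pvW cur (' ' :: cs) = cur :: pvW [] cs from by simp [pvW]]
      rw [show pvG cur.length (' ' :: cs) = ' ' :: pvG 0 cs from by simp [pvG]]
      simp only [pvJ]
      rw [pv_Jtail_eq _ (pvW_ne_nil [] cs)]
      have h0 := ih ([] : List Char)
      simp only [pvWmapFrom, List.nil_append, List.length_nil] at h0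
      simp [h0]
    · rw [show pvW cur (c :: cs) = pvW (cur ++ [c]) cs from by simp [pvW, hc]]
      rw [show pvG cur.length (c :: cs)
            = pvF cur.length c :: pvG (cur.length + 1) cs from by simp [pvG, hc]]
      rw [ih (cur ++ [c])]
      have h1 : pvWmapFrom 0 (cur ++ [c]) = pvWmapFrom 0 cur ++ [pvF cur.length c] := by
        simpa using pvWmapFrom_append 0 cur c
      simp [h1]

-- ===== VERDICT (by name: the statement is the Claim_ definition above) =====
theorem solution_spec : Claim_equal_solution := by
  intro s _
  unfold Spec_solution
  simp only [solution, solution_alt]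
  rw [pv_foldB s.toList [] 0, pv_splitOn_eq]
  have hmain : (((pvW [] s.toList)).foldl (fun (st : List Char × Nat) i =>
      let answer := if st.2 ≠ 0 then st.1 ++ [' '] else st.1
      let answer := (PySem.List.pyRange 0 (PySem.List.len i) 1).foldl (fun answer j =>
          let cj := PySem.List.pyGetD i j ' '
          if PySem.Int.mod j 2 == 0 then
            (if cj.toNat ≥ 97 then answer ++ [Char.ofNat (cj.toNat - (97 - 65))]
             else answer ++ [cj])
          else
            (if cj.toNat < 97 then answer ++ [Char.ofNat (cj.toNat + (97 - 65))]
             else answer ++ [cj])) answer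
      (answer, st.2 + 1)) ([], 0)).1 = pvJ (pvW [] s.toList) := by
    cases hW : pvW ([] : List Char) s.toList with
    | nil => exact absurd hW (pvW_ne_nil [] s.toList)
    | cons w ws =>
      simp only [List.foldl_cons]
      rw [show (if (0 : Nat) ≠ 0 then ([] : List Char) ++ [' '] else []) = [] from rfl]
      rw [pv_inner w [], pv_outerA ws _ 1 one_ne_zero]
      simp [pvJ]
  rw [hmain, pv_bridge]
  simp [pvWmapFrom]
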